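-- pv_equiv track=rewrite | github.com/johnnyjvang/tb3_lidar_validation | tb3_lidar_validation/front_obstacle_detection.py | largest_consecutive_cluster
-- ===== SOURCE A (Python) =====
-- def largest_consecutive_cluster(points):
--     if not points:
--         return []
--
--     clusters = []
--     current_cluster = [points[0]]
--
--     for prev, curr in zip(points[:-1], points[1:]):
--         prev_i = prev[0]
--         curr_i = curr[0]
--
--         if curr_i == prev_i + 1:
--             current_cluster.append(curr)
--         else:
--             clusters.append(current_cluster)
--             current_cluster = [curr]
--
--     clusters.append(current_cluster)
--
--     largest = max(clusters, key=len)
--     return largest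
-- ===== SOURCE B (Python) =====
-- def largest_consecutive_cluster(points):
--     best_len = best_end = run_len = end = 0
--     prev = None
--     for p in points:
--         end += 1
--         run_len = run_len + 1 if (prev is not None and p[0] == prev + 1) else 1
--         if run_len > best_len:
--             best_len, best_end = run_len, end
--         prev = p[0]
--     return points[best_end - best_len:best_end]
-- ===== Notes on version B (the rewrite author's own statement) =====
-- stated objective: alternative
-- what changed: Instead of materialising every cluster as a list and taking max(key=len), B keeps only four integer counters (current run length, best length, best end position, previous index) in one pass and recovers the winning cluster with a single slice at the end.
import Mathlib
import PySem

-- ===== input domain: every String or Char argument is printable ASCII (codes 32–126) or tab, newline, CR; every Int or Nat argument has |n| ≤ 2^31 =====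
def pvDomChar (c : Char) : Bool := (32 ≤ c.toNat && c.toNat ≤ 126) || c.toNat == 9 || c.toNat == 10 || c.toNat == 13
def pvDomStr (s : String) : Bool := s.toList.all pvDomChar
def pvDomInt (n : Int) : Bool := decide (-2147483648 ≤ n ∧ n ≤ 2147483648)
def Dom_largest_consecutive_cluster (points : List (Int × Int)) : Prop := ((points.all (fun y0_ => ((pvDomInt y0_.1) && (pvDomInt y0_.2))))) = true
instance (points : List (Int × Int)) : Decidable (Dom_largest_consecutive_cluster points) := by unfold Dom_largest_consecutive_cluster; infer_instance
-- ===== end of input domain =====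

-- B keeps only integer counters (run length, best length, best end, previous index) in one
-- pass and recovers the winning cluster by a single slice, instead of A's materialised
-- cluster lists plus max(key=len) (objective: alternative; same O(n) cost).

-- ===== PORT A =====
-- one loop step of A: state (clusters, current_cluster), pc = (prev, curr)
def lccStepA (st : List (List (Int × Int)) × List (Int × Int)) (pc : (Int × Int) × (Int × Int)) :
    List (List (Int × Int)) × List (Int × Int) :=
  if pc.2.1 = pc.1.1 + 1 then (st.1, st.2 ++ [pc.2]) else (st.1 ++ [st.2], [pc.2])

-- max(_, key=len): first element of maximal length; step 'if len(x) > len(m) then x else m'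
def lccPick (m x : List (Int × Int)) : List (Int × Int) :=
  if m.length < x.length then x else m

def lccMax (clusters : List (List (Int × Int))) : List (Int × Int) :=
  match clusters with
  | [] => []
  | c :: cs => cs.foldl lccPick c

def largest_consecutive_cluster (points : List (Int × Int)) : List (Int × Int) :=
  match points with
  | [] => []
  | p0 :: _ =>
    -- points[:-1] = dropLast, points[1:] = tail (exact on any list)
    let st := (points.dropLast.zip points.tail).foldl lccStepA ([], [p0])
    lccMax (st.1 ++ [st.2])

-- ===== PORT B =====
-- one loop step of B: state (best_len, best_end, run_len, prev, end)
def lccStepB (st : Int × Int × Int × Option Int × Int) (p : Int × Int) :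
    Int × Int × Int × Option Int × Int :=
  let en := st.2.2.2.2 + 1
  let rl :=
    match st.2.2.2.1 with
    | some pv => if p.1 = pv + 1 then st.2.2.1 + 1 else 1
    | none => 1
  let bb := if st.1 < rl then (rl, en) else (st.1, st.2.1)
  (bb.1, bb.2, rl, some p.1, en)

def largest_consecutive_cluster_alt (points : List (Int × Int)) : List (Int × Int) :=
  let st := points.foldl lccStepB (0, 0, 0, none, 0)
  PySem.List.slice points (some (st.2.1 - st.1)) (some st.2.1)

-- ===== PRECONDITION & SPEC =====
def Spec_largest_consecutive_cluster (points : List (Int × Int)) (out : List (Int × Int)) : Prop := out = largest_consecutive_cluster_alt points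
instance (points : List (Int × Int)) (out : List (Int × Int)) : Decidable (Spec_largest_consecutive_cluster points out) := by unfold Spec_largest_consecutive_cluster; infer_instance

-- ===== CLAIM (what is proved, stated in full; the proofs are below) =====
def Claim_equal_largest_consecutive_cluster : Prop := ∀ (points : List (Int × Int)), Dom_largest_consecutive_cluster points → Spec_largest_consecutive_cluster points (largest_consecutive_cluster points)

-- ===== LEMMAS AND PROOFS =====

lemma lccPick_length_ge (m x : List (Int × Int)) : x.length ≤ (lccPick m x).length := by
  unfold lccPick; split <;> omega

-- final max over A's clusters ++ [current] in incremental form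
lemma lccMax_append (cs : List (List (Int × Int))) (current : List (Int × Int))
    (hcs : ∀ c ∈ cs, c ≠ []) (hc : current ≠ []) :
    lccMax (cs ++ [current]) = lccPick (cs.foldl lccPick []) current := by
  cases cs with
  | nil => simp [lccMax, lccPick, List.length_pos_iff.mpr hc]
  | cons c cs' =>
    have hcne : c ≠ [] := hcs c (by simp)
    have h1 : lccPick [] c = c := by
      simp [lccPick, List.length_pos_iff.mpr hcne]
    simp only [List.cons_append, lccMax, List.foldl_append, List.foldl_cons, List.foldl_nil, h1]

-- the growing-run case of the eager best update
lemma lccPick_grow (M current : List (Int × Int)) (r : Int × Int) :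
    lccPick (lccPick M current) (current ++ [r]) = lccPick M (current ++ [r]) := by
  unfold lccPick
  by_cases h : M.length < current.length
  · have e1 : (if M.length < current.length then current else M) = current := if_pos h
    rw [e1, if_pos (by simp), if_pos (by simp; omega)]
  · have e1 : (if M.length < current.length then current else M) = M := if_neg h
    rw [e1]

-- zip over (dropLast, tail) only ever reads the first (length tail) entries of the first list
lemma lcc_zip_dropLast (xs ys : List (Int × Int)) (h : ys.length < xs.length) :
    xs.dropLast.zip ys = xs.zip ys := by
  induction xs generalizing ys with
  | nil => simp
  | cons a t ih =>
    cases ys with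
    | nil => simp
    | cons b u =>
      have ht : t ≠ [] := by
        intro h0; subst h0
        simp only [List.length_cons, List.length_nil] at h; omega
      rw [List.dropLast_cons_of_ne_nil ht]
      simp only [List.zip_cons_cons]
      congr 1
      exact ih u (by simpa using Nat.lt_of_succ_lt_succ h)

-- main loop invariant: A's fold over the remaining pairs vs B's fold over the remaining points.
-- 'done' is the processed prefix, q its last element, cur the current run (a suffix of done),
-- and B's counters encode the first-longest cluster so far as (length, end-position) into done.
lemma lcc_loop (l : List (Int × Int)) :
    ∀ (done d0 u w : List (Int × Int)) (q : Int × Int)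
      (cs : List (List (Int × Int))) (cur : List (Int × Int)),
    done = d0 ++ cur → cur ≠ [] → (∀ c ∈ cs, c ≠ []) →
    done = u ++ lccPick (cs.foldl lccPick []) cur ++ w →
    ∃ U B W, done ++ l = U ++ B ++ W ∧
      (l.foldl lccStepB
        (((lccPick (cs.foldl lccPick []) cur).length : Int),
         ((u.length + (lccPick (cs.foldl lccPick []) cur).length : Nat) : Int),
         (cur.length : Int), some q.1, (done.length : Int))).1 = (B.length : Int) ∧
      (l.foldl lccStepB
        (((lccPick (cs.foldl lccPick []) cur).length : Int),
         ((u.length + (lccPick (cs.foldl lccPick []) cur).length : Nat) : Int),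
         (cur.length : Int), some q.1, (done.length : Int))).2.1
        = ((U.length + B.length : Nat) : Int) ∧
      B = lccMax ((((q :: l).zip l).foldl lccStepA (cs, cur)).1
            ++ [(((q :: l).zip l).foldl lccStepA (cs, cur)).2]) := by
  induction l with
  | nil =>
    intro done d0 u w q cs cur hdone hc hcs hbest
    refine ⟨u, lccPick (cs.foldl lccPick []) cur, w, by simpa using hbest, rfl, rfl, ?_⟩
    exact (lccMax_append cs cur hcs hc).symm
  | cons p l' ih =>
    intro done d0 u w q cs cur hdone hc hcs hbest
    simp only [List.zip_cons_cons, List.foldl_cons]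
    by_cases hcons : p.1 = q.1 + 1
    · -- consecutive: A extends current, B bumps run_len
      have hA : lccStepA (cs, cur) (q, p) = (cs, cur ++ [p]) := by
        simp [lccStepA, hcons]
      set M := cs.foldl lccPick [] with hM
      have hgrow : lccPick (lccPick M cur) (cur ++ [p]) = lccPick M (cur ++ [p]) :=
        lccPick_grow M cur p
      rw [hA]
      by_cases hlt : (lccPick M cur).length < cur.length + 1
      · -- the growing run becomes (or stays) the best: best' = cur ++ [p]
        have hcast : ((lccPick M cur).length : Int) < (cur.length : Int) + 1 := by
          exact_mod_cast hlt
        have hpe : lccPick M (cur ++ [p]) = cur ++ [p] := by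
          rw [← hgrow]; unfold lccPick
          rw [if_pos (by simpa using hlt)]
        have hstep : lccStepB (((lccPick M cur).length : Int),
              ((u.length + (lccPick M cur).length : Nat) : Int),
              (cur.length : Int), some q.1, (done.length : Int)) p
            = (((cur.length : Int) + 1), ((done.length : Int) + 1),
               ((cur.length : Int) + 1), some p.1, ((done.length : Int) + 1)) := by
          simp [lccStepB, hcons, hcast]
        have hkey := ih (done ++ [p]) d0 d0 [] p cs (cur ++ [p])
          (by rw [hdone, List.append_assoc]) (by simp) hcs
          (by rw [hpe, hdone]; simp)
        rw [hpe] at hkey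
        have hS : ((((cur ++ [p]).length : Nat) : Int),
              (((d0.length + (cur ++ [p]).length : Nat)) : Int),
              (((cur ++ [p]).length : Nat) : Int), some p.1,
              (((done ++ [p]).length : Nat) : Int))
            = (((cur.length : Int) + 1), ((done.length : Int) + 1),
               ((cur.length : Int) + 1), some p.1, ((done.length : Int) + 1)) := by
          rw [hdone]; push_cast; simp; ring
        rw [hS] at hkey
        rw [hstep]
        rcases hkey with ⟨U, B, W, h1, h2, h3, h4⟩
        exact ⟨U, B, W, by simpa [List.append_assoc] using h1, h2, h3, h4⟩
      · -- best unchanged: best' = lccPick M cur still sits at (u, w ++ [p])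
        have hcast : ¬ ((lccPick M cur).length : Int) < (cur.length : Int) + 1 := by
          exact_mod_cast hlt
        have hpe : lccPick M (cur ++ [p]) = lccPick M cur := by
          rw [← hgrow]; unfold lccPick
          rw [if_neg (by simpa using hlt)]
        have hstep : lccStepB (((lccPick M cur).length : Int),
              ((u.length + (lccPick M cur).length : Nat) : Int),
              (cur.length : Int), some q.1, (done.length : Int)) p
            = (((lccPick M cur).length : Int),
               ((u.length + (lccPick M cur).length : Nat) : Int),
               ((cur.length : Int) + 1), some p.1, ((done.length : Int) + 1)) := by
          simp [lccStepB, hcons, hcast]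
        have hkey := ih (done ++ [p]) d0 u (w ++ [p]) p cs (cur ++ [p])
          (by rw [hdone, List.append_assoc]) (by simp) hcs
          (by rw [hpe, hbest]; simp [List.append_assoc])
        rw [hpe] at hkey
        have hS : (((lccPick M cur).length : Int),
              (((u.length + (lccPick M cur).length : Nat)) : Int),
              (((cur ++ [p]).length : Nat) : Int), some p.1,
              (((done ++ [p]).length : Nat) : Int))
            = (((lccPick M cur).length : Int),
               ((u.length + (lccPick M cur).length : Nat) : Int),
               ((cur.length : Int) + 1), some p.1, ((done.length : Int) + 1)) := by
          push_cast; simp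
        rw [hS] at hkey
        rw [hstep]
        rcases hkey with ⟨U, B, W, h1, h2, h3, h4⟩
        exact ⟨U, B, W, by simpa [List.append_assoc] using h1, h2, h3, h4⟩
    · -- break: A closes current, B resets run_len to 1; the best cannot shrink below 1
      have hA : lccStepA (cs, cur) (q, p) = (cs ++ [cur], [p]) := by
        simp [lccStepA, hcons]
      set M := cs.foldl lccPick [] with hM
      have hM' : (cs ++ [cur]).foldl lccPick [] = lccPick M cur := by
        simp [hM, List.foldl_append]
      have h1le : 1 ≤ (lccPick M cur).length := by
        have h := lccPick_length_ge M cur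
        have : 0 < cur.length := List.length_pos_iff.mpr hc
        omega
      have hpe : lccPick (lccPick M cur) [p] = lccPick M cur := by
        have e : lccPick (lccPick M cur) [p]
            = if (lccPick M cur).length < ([p] : List (Int × Int)).length
              then ([p] : List (Int × Int)) else lccPick M cur := rfl
        rw [e, if_neg (by simp only [List.length_cons, List.length_nil]; omega)]
      have hcast : ¬ ((lccPick M cur).length : Int) < 1 := by
        exact_mod_cast (by omega : ¬ (lccPick M cur).length < 1)
      have hstep : lccStepB (((lccPick M cur).length : Int),
            ((u.length + (lccPick M cur).length : Nat) : Int),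
            (cur.length : Int), some q.1, (done.length : Int)) p
          = (((lccPick M cur).length : Int),
             ((u.length + (lccPick M cur).length : Nat) : Int),
             (1 : Int), some p.1, ((done.length : Int) + 1)) := by
        simp [lccStepB, hcons, hcast]
      rw [hA, hstep]
      have hkey := ih (done ++ [p]) done u (w ++ [p]) p (cs ++ [cur]) [p]
        rfl (by simp)
        (by intro c hcm; rcases List.mem_append.mp hcm with h | h
            · exact hcs c h
            · simp at h; simpa [h] using hc)
        (by rw [hM', hpe, hbest]; simp [List.append_assoc])
      rw [hM', hpe] at hkey
      have hS : (((lccPick M cur).length : Int),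
            (((u.length + (lccPick M cur).length : Nat)) : Int),
            ((([p] : List (Int × Int)).length : Nat) : Int), some p.1,
            (((done ++ [p]).length : Nat) : Int))
          = (((lccPick M cur).length : Int),
             ((u.length + (lccPick M cur).length : Nat) : Int),
             (1 : Int), some p.1, ((done.length : Int) + 1)) := by
        push_cast; simp
      rw [hS] at hkey
      rcases hkey with ⟨U, B, W, h1, h2, h3, h4⟩
      exact ⟨U, B, W, by simpa [List.append_assoc] using h1, h2, h3, h4⟩

-- the final slice recovers the best cluster from its (length, end) encoding
lemma lcc_slice (U B W : List (Int × Int)) :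
    PySem.List.slice (U ++ B ++ W)
      (some (((U.length + B.length : Nat) : Int) - (B.length : Int)))
      (some ((U.length + B.length : Nat) : Int)) = B := by
  have h1 : (((U.length + B.length : Nat) : Int) - (B.length : Int)) = ((U.length : Nat) : Int) := by
    push_cast; ring
  rw [h1, PySem.List.slice_natCast]
  simp

-- ===== VERDICT (by name: the statement is the Claim_ definition above) =====
theorem largest_consecutive_cluster_spec : Claim_equal_largest_consecutive_cluster := by
  intro points _
  unfold Spec_largest_consecutive_cluster
  cases points with
  | nil => rfl
  | cons p0 rest =>
    -- first element: B's state after one step matches the loop invariant with done = [p0]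
    have hB0 : lccStepB (0, 0, 0, none, 0) p0 = (1, 1, 1, some p0.1, 1) := by
      simp [lccStepB]
    have hzip : (p0 :: rest).dropLast.zip rest = (p0 :: rest).zip rest := by
      apply lcc_zip_dropLast; simp
    have hkey := lcc_loop rest [p0] [] [] [] p0 [] [p0] (by simp) (by simp) (by simp)
      (by simp [lccPick])
    have hstate : (((lccPick (([] : List (List (Int × Int))).foldl lccPick []) [p0]).length : Int),
          ((([] : List (Int × Int)).length
              + (lccPick (([] : List (List (Int × Int))).foldl lccPick []) [p0]).length : Nat) : Int),
          ((([p0] : List (Int × Int)).length : Nat) : Int), some p0.1,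
          ((([p0] : List (Int × Int)).length : Nat) : Int))
        = ((1 : Int), (1 : Int), (1 : Int), some p0.1, (1 : Int)) := by
      simp [lccPick]
    rw [hstate] at hkey
    rcases hkey with ⟨U, B, W, h1, h2, h3, h4⟩
    simp only [largest_consecutive_cluster, largest_consecutive_cluster_alt,
      List.foldl_cons, hB0, List.tail_cons, hzip]
    rw [← h4, h2, h3]
    have hpts : p0 :: rest = U ++ B ++ W := by simpa using h1
    rw [hpts, lcc_slice]
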